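-- pv_equiv track=rewrite | github.com/luskan/adventofcode_2024_python | day21.py | path_to_dirs
-- ===== SOURCE A (Python) =====
-- from typing import Tuple, List
--
-- Point2 = Tuple[int, int]
--
-- def is_valid_path(path: List[Point2]) -> bool:
--     for i in range(1, len(path)):
--         r1, c1 = path[i - 1]
--         r2, c2 = path[i]
--         if not ((abs(r2 - r1) == 1 and c2 == c1) or (abs(c2 - c1) == 1 and r2 == r1)):
--             return False
--     return True
--
-- def path_to_dirs(path: List[Point2]) -> str:
--     if not is_valid_path(path):
--         raise ValueError("Invalid path: non-adjacent points detected.")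
--     dirs = []
--     for i in range(1, len(path)):
--         r1, c1 = path[i - 1]
--         r2, c2 = path[i]
--         if r1 == r2:
--             if c2 > c1:
--                 dirs.append('>')
--             else:
--                 dirs.append('<')
--         else:
--             if r2 > r1:
--                 dirs.append('v')
--             else:
--                 dirs.append('^')
--     return ''.join(dirs)
-- ===== SOURCE B (Python) =====
-- def path_to_dirs(path):
--     # Recursive decomposition: emit one char per step, computed by arithmetic
--     # indexing into "^< >v" via 2*dr + dc + 2 (valid unit deltas only).
--     if len(path) < 2:
--         return ""
--     (r1, c1), (r2, c2) = path[0], path[1]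
--     dr, dc = r2 - r1, c2 - c1
--     if abs(dr) + abs(dc) != 1:
--         raise ValueError("Invalid path: non-adjacent points detected.")
--     return "^< >v"[2 * dr + dc + 2] + path_to_dirs(path[1:])
-- ===== Notes on version B (the rewrite author's own statement) =====
-- stated objective: alternative
-- what changed: Replaced the two staged index loops (validation pass, then a nested if/else branch tree appending to a list) by a recursion on the path that computes each direction char arithmetically, indexing the string "^< >v" with 2*dr+dc+2, validating each step as it goes.
import Mathlib
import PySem

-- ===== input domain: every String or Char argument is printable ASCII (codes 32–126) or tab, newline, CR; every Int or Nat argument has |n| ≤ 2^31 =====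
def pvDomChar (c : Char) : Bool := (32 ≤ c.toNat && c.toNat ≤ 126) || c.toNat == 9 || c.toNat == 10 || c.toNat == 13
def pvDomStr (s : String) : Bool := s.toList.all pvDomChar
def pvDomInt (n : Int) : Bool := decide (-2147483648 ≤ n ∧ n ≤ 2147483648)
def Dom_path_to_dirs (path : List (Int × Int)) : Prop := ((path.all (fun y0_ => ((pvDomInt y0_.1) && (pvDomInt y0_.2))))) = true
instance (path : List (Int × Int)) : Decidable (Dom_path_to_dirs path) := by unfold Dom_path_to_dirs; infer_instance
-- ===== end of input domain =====

-- B replaces A's two staged loops (validation pass, then a branch-tree append loop) by a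
-- recursion on the path that computes each char arithmetically by indexing "^< >v" with
-- 2*dr+dc+2, validating each step as it goes (objective: alternative).  Where the Python A
-- raises ValueError (some consecutive pair non-adjacent) B raises too (at the first bad
-- step); those inputs are excluded by Pre_path_to_dirs.

-- ===== PORT A =====
-- the i-loop of is_valid_path over consecutive pairs
def pvIsValidPath : List (Int × Int) → Bool
  | (r1, c1) :: (r2, c2) :: rest =>
      if ((r2 - r1).natAbs = 1 ∧ c2 = c1) ∨ ((c2 - c1).natAbs = 1 ∧ r2 = r1) then
        pvIsValidPath ((r2, c2) :: rest)
      else false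
  | _ => true

-- the dirs-building loop of A (nested if/else branch tree)
def pvDirsA : List (Int × Int) → List Char
  | (r1, c1) :: (r2, c2) :: rest =>
      (if r1 = r2 then (if c2 > c1 then '>' else '<')
       else (if r2 > r1 then 'v' else '^')) :: pvDirsA ((r2, c2) :: rest)
  | _ => []

-- on invalid paths the Python raises ValueError; those inputs lie outside Pre_path_to_dirs
def path_to_dirs (path : List (Int × Int)) : String :=
  if pvIsValidPath path then String.ofList (pvDirsA path) else ""

-- ===== PORT B =====
-- recursion on the path; the empty string on the non-adjacent guard stands for the
-- raised ValueError (those inputs are outside Pre_path_to_dirs)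
def path_to_dirs_alt : List (Int × Int) → String
  | (r1, c1) :: (r2, c2) :: rest =>
      let dr := r2 - r1
      let dc := c2 - c1
      if dr.natAbs + dc.natAbs ≠ 1 then ""
      else
        match PySem.Str.pyGet? "^< >v" (2 * dr + dc + 2) with
        | some ch => String.ofList [ch] ++ path_to_dirs_alt ((r2, c2) :: rest)
        | none => ""   -- unreachable under the guard (index always in range)
  | _ => ""

-- ===== PRECONDITION & SPEC =====
-- Pre_ excludes exactly the inputs with a non-adjacent consecutive pair, on which
-- both Pythons raise ValueError("Invalid path: non-adjacent points detected.").
def Pre_path_to_dirs (path : List (Int × Int)) : Prop :=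
  List.IsChain
    (fun p q => ((q.1 - p.1 = 1 ∨ q.1 - p.1 = -1) ∧ q.2 - p.2 = 0) ∨
                ((q.2 - p.2 = 1 ∨ q.2 - p.2 = -1) ∧ q.1 - p.1 = 0))
    path
instance (path : List (Int × Int)) : Decidable (Pre_path_to_dirs path) := by
  unfold Pre_path_to_dirs; infer_instance

def pvWitness_path_to_dirs : (List (Int × Int)) := [(0, 0), (0, 1), (1, 1), (1, 0)]

def Spec_path_to_dirs (path : List (Int × Int)) (out : String) : Prop := out = path_to_dirs_alt path
instance (path : List (Int × Int)) (out : String) : Decidable (Spec_path_to_dirs path out) := by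
  unfold Spec_path_to_dirs; infer_instance

-- ===== CLAIM (what is proved, stated in full; the proofs are below) =====
def Claim_equal_path_to_dirs : Prop := ∀ (path : List (Int × Int)), Dom_path_to_dirs path → Pre_path_to_dirs path → Spec_path_to_dirs path (path_to_dirs path)

-- ===== LEMMAS AND PROOFS =====

-- the explicit ±1/0 form of Pre_'s step condition implies A's natAbs form
theorem pvAdjConv (r1 c1 r2 c2 : Int)
    (h : ((r2 - r1 = 1 ∨ r2 - r1 = -1) ∧ c2 - c1 = 0) ∨
         ((c2 - c1 = 1 ∨ c2 - c1 = -1) ∧ r2 - r1 = 0)) :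
    ((r2 - r1).natAbs = 1 ∧ c2 = c1) ∨ ((c2 - c1).natAbs = 1 ∧ r2 = r1) := by
  omega

-- on an adjacent pair B's guard passes and the arithmetic string index yields exactly
-- A's branch-tree character
theorem pvStepB_adj (r1 c1 r2 c2 : Int)
    (h : ((r2 - r1).natAbs = 1 ∧ c2 = c1) ∨ ((c2 - c1).natAbs = 1 ∧ r2 = r1)) :
    ¬ ((r2 - r1).natAbs + (c2 - c1).natAbs ≠ 1) ∧
    PySem.Str.pyGet? "^< >v" (2 * (r2 - r1) + (c2 - c1) + 2) =
      some (if r1 = r2 then (if c2 > c1 then '>' else '<')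
            else (if r2 > r1 then 'v' else '^')) := by
  refine ⟨by omega, ?_⟩
  rcases h with ⟨hd, he⟩ | ⟨hd, he⟩ <;>
    rcases Int.natAbs_eq_iff.mp hd with h1 | h1
  · rw [show 2 * (r2 - r1) + (c2 - c1) + 2 = 4 by omega,
      if_neg (by omega), if_pos (by omega)]; decide
  · rw [show 2 * (r2 - r1) + (c2 - c1) + 2 = 0 by omega,
      if_neg (by omega), if_neg (by omega)]; decide
  · rw [show 2 * (r2 - r1) + (c2 - c1) + 2 = 3 by omega,
      if_pos (by omega), if_pos (by omega)]; decide
  · rw [show 2 * (r2 - r1) + (c2 - c1) + 2 = 1 by omega,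
      if_pos (by omega), if_neg (by omega)]; decide

theorem pvAlt_eq_dirsA (path : List (Int × Int)) (h : Pre_path_to_dirs path) :
    path_to_dirs_alt path = String.ofList (pvDirsA path) := by
  induction path with
  | nil => rfl
  | cons p rest ih =>
    match rest, h with
    | [], _ => rfl
    | q :: rest', h =>
      rw [Pre_path_to_dirs, List.isChain_cons] at h
      obtain ⟨hadj, htail⟩ := h
      obtain ⟨r1, c1⟩ := p
      obtain ⟨r2, c2⟩ := q
      obtain ⟨hg, hget⟩ := pvStepB_adj r1 c1 r2 c2 (pvAdjConv r1 c1 r2 c2 (hadj (r2, c2) rfl))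
      rw [path_to_dirs_alt]
      simp only [if_neg hg, hget, ih htail, pvDirsA]
      apply String.toList_injective
      simp

theorem pvIsValid_of_pre (path : List (Int × Int)) (h : Pre_path_to_dirs path) :
    pvIsValidPath path = true := by
  induction path with
  | nil => rfl
  | cons p rest ih =>
    match rest, h with
    | [], _ => rfl
    | q :: rest', h =>
      rw [Pre_path_to_dirs, List.isChain_cons] at h
      obtain ⟨hadj, htail⟩ := h
      obtain ⟨r1, c1⟩ := p
      obtain ⟨r2, c2⟩ := q
      rw [pvIsValidPath, if_pos (pvAdjConv r1 c1 r2 c2 (hadj (r2, c2) rfl))]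
      exact ih htail

-- ===== VERDICT (by name: the statement is the Claim_ definition above) =====
theorem path_to_dirs_spec : Claim_equal_path_to_dirs := by
  intro path _ hpre
  unfold Spec_path_to_dirs path_to_dirs
  rw [pvIsValid_of_pre path hpre, pvAlt_eq_dirsA path hpre]
  rfl
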